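-- pv_equiv track=rewrite | github.com/arpit-saxena/col100 | quiz/q2.py | evaluate
-- ===== SOURCE A (Python) =====
-- def evaluate(a, m):
--     #assert: a is an array of ints, m is an int
--     n = len(a)
--     i = 0
--     val = 0
--
--     #INV: val = a[n - i] + a[n - i + 1] * m^1 + .. + a[n-1] * m^i, 0 <= i <= n
--     while i < n:
--         val = val * m + a[n - i - 1]
--         i = i + 1
--
--     #assert: val = a[0] + a[1] * m + a[2] * m^2 + .. + a[n-1] * m^(n-1)
--     return val
-- ===== SOURCE B (Python) =====
-- def evaluate(a, m):
--     total = 0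
--     p = 1
--     for coeff in a:
--         total += coeff * p
--         p *= m
--     return total
-- ===== Notes on version B (the rewrite author's own statement) =====
-- stated objective: alternative
-- what changed: Replaces Horner's backward recurrence (running value folded by val*m+coeff from the last coefficient) with a forward single pass maintaining an explicit running power of m and accumulating coeff*power.
import Mathlib
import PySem

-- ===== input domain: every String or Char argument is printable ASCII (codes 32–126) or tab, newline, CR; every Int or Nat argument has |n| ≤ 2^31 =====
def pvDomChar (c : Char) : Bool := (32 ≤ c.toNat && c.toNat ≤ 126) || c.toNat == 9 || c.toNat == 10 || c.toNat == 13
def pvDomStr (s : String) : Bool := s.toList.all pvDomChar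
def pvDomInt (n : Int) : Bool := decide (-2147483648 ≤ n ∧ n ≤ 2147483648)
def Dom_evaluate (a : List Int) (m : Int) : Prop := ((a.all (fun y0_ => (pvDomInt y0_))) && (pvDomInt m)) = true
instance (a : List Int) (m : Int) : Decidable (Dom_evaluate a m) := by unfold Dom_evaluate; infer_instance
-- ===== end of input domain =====

-- B replaces Horner's backward recurrence with a forward pass keeping an explicit running power of m (alternative decomposition, same cost).


-- ===== PORT A =====
-- while i < n: val = val * m + a[n - i - 1]; the index is always in range, so pyGetD is exact
def evaluate (a : List Int) (m : Int) : Int :=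
  (PySem.List.pyRange 0 (a.length : Int) 1).foldl
    (fun val i => val * m + PySem.List.pyGetD a ((a.length : Int) - i - 1) 0) 0

-- ===== PORT B =====
-- forward loop over the coefficients carrying (total, power)
def evaluate_alt (a : List Int) (m : Int) : Int :=
  (a.foldl (fun (s : Int × Int) coeff => (s.1 + coeff * s.2, s.2 * m)) (0, 1)).1

-- ===== PRECONDITION & SPEC =====
def Spec_evaluate (a : List Int) (m : Int) (out : Int) : Prop := out = evaluate_alt a m
instance (a : List Int) (m : Int) (out : Int) : Decidable (Spec_evaluate a m out) := by unfold Spec_evaluate; infer_instance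

-- ===== CLAIM (what is proved, stated in full; the proofs are below) =====
def Claim_equal_evaluate : Prop := ∀ (a : List Int) (m : Int), Dom_evaluate a m → Spec_evaluate a m (evaluate a m)

-- ===== LEMMAS AND PROOFS =====

-- reference value: the polynomial a₀ + a₁·m + a₂·m² + …
def pvPoly (a : List Int) (m : Int) : Int :=
  match a with
  | [] => 0
  | c :: t => c + m * pvPoly t m

theorem evaluate_alt_inv (a : List Int) (m : Int) (t p : Int) :
    (a.foldl (fun (s : Int × Int) coeff => (s.1 + coeff * s.2, s.2 * m)) (t, p)).1
      = t + p * pvPoly a m := by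
  induction a generalizing t p with
  | nil => simp [pvPoly]
  | cons c tl ih => simp only [List.foldl, pvPoly, ih]; ring

theorem evaluate_alt_eq (a : List Int) (m : Int) : evaluate_alt a m = pvPoly a m := by
  simpa using evaluate_alt_inv a m 0 1

theorem evaluate_eq (a : List Int) (m : Int) : evaluate a m = pvPoly a m := by
  induction a with
  | nil => simp [evaluate, PySem.List.pyRange_one_eq_nil, pvPoly]
  | cons c t ih =>
    unfold evaluate
    have hlen : ((c :: t).length : Int) = (t.length : Int) + 1 := by
      simp
    rw [hlen, PySem.List.pyRange_one_succ_right (by positivity),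
        List.foldl_append]
    have hcongr :
        (PySem.List.pyRange 0 (t.length : Int) 1).foldl
          (fun val i => val * m + PySem.List.pyGetD (c :: t) ((t.length : Int) + 1 - i - 1) 0) 0
        = (PySem.List.pyRange 0 (t.length : Int) 1).foldl
          (fun val i => val * m + PySem.List.pyGetD t ((t.length : Int) - i - 1) 0) 0 := by
      apply PySem.List.foldl_congr_mem
      intro acc i hi
      rw [PySem.List.mem_pyRange_one] at hi
      have h0 : (0:Int) ≤ (t.length : Int) + 1 - i - 1 := by omega
      have h1 : (t.length : Int) + 1 - i - 1 < ((c :: t).length : Int) := by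
        omega
      have h0' : (0:Int) ≤ (t.length : Int) - i - 1 := by omega
      have h1' : (t.length : Int) - i - 1 < ((t.length : Int)) := by omega
      rw [PySem.List.pyGetD_eq_getElem (c :: t) 0 h0 (by simpa using h1),
          PySem.List.pyGetD_eq_getElem t 0 h0' (by simpa using h1')]
      congr 1
      have : ((t.length : Int) + 1 - i - 1).toNat = ((t.length : Int) - i - 1).toNat + 1 := by omega
      simp [this]
    rw [hcongr]
    unfold evaluate at ih
    rw [ih]
    have hlast : PySem.List.pyGetD (c :: t) ((t.length : Int) + 1 - (t.length : Int) - 1) 0 = c := by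
      have : (t.length : Int) + 1 - (t.length : Int) - 1 = 0 := by ring
      rw [this, PySem.List.pyGetD_zero_cons]
    simp only [List.foldl_cons, List.foldl_nil]
    rw [hlast]
    simp [pvPoly]; ring

-- ===== VERDICT (by name: the statement is the Claim_ definition above) =====
theorem evaluate_spec : Claim_equal_evaluate := by
  intro a m _
  unfold Spec_evaluate
  rw [evaluate_eq, evaluate_alt_eq]
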